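-- pv_equiv track=rewrite | github.com/chandev123/daily_log_251024 | 2025/11_November/daily/fri_2025_11_07.py | solution
-- ===== SOURCE A (Python) =====
-- def solution(arr):
--     stk = []
--     i = 0
--
--     while i < len(arr):
--         if stk:
--             if stk[-1] < arr[i]:
--                 stk.append(arr[i])
--                 i += 1
--             elif stk[-1] >= arr[i]:
--                 stk.pop()
--         else:
--             stk.append(arr[i])
--             i += 1
--
--     return stk
-- ===== SOURCE B (Python) =====
-- def solution(arr):
--     if not arr:
--         return []
--     m = arr[-1]
--     res = [m]
--     for x in reversed(arr[:-1]):
--         if x < m: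
--             res.append(x)
--             m = x
--     return res[::-1]
-- ===== Notes on version B (the rewrite author's own statement) =====
-- stated objective: simpler
-- what changed: Replaced the pop/push stack loop with a single right-to-left scan keeping a running minimum: an element is kept exactly when it is strictly smaller than everything to its right.
import Mathlib
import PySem

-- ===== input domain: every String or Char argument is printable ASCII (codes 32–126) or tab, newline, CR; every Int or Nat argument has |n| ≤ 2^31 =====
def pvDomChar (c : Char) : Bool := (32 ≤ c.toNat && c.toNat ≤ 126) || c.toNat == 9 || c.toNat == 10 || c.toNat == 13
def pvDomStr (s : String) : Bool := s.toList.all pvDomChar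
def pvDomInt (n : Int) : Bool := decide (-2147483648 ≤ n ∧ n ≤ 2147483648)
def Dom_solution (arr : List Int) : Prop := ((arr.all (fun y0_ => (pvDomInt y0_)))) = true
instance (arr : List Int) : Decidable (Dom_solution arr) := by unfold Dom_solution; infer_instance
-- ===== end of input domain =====

-- B replaces A's pop/push stack loop by one right-to-left scan with a running minimum (simpler; same return value).

-- ===== PORT A =====
-- A's while loop over state (stk, i): the stack is held head-first (head = Python stk[-1]),
-- the index i is carried as the remaining slice arr[i:] (the pop branch leaves it unchanged,
-- exactly as Python's pop branch leaves i unchanged); the stack is reversed on return to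
-- Python's bottom-first order.  The pop guard `stk[-1] >= arr[i]` is the negation of the
-- first guard, hence the plain `else`.
def solutionRun : List Int → List Int → List Int
  | [], stk => stk
  | x :: rest, [] => solutionRun rest [x]
  | x :: rest, t :: s =>
    if t < x then solutionRun rest (x :: t :: s)
    else solutionRun (x :: rest) s
termination_by rem stk => 2 * rem.length + stk.length
decreasing_by all_goals (simp only [List.length_cons]; omega)

def solution (arr : List Int) : List Int := (solutionRun arr []).reverse

-- ===== PORT B =====
-- Source B: seed (res, m) with the last element, fold over reversed(arr[:-1]) appending each
-- strictly smaller element and updating m, then reverse res.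
def solution_alt (arr : List Int) : List Int :=
  match arr.reverse with
  | [] => []
  | m0 :: l =>
    (l.foldl (fun (st : List Int × Int) x => if x < st.2 then (st.1 ++ [x], x) else st)
      ([m0], m0)).1.reverse

-- ===== PRECONDITION & SPEC =====
def Spec_solution (arr : List Int) (out : List Int) : Prop := out = solution_alt arr
instance (arr : List Int) (out : List Int) : Decidable (Spec_solution arr out) := by unfold Spec_solution; infer_instance

-- ===== CLAIM (what is proved, stated in full; the proofs are below) =====
def Claim_equal_solution : Prop := ∀ (arr : List Int), Dom_solution arr → Spec_solution arr (solution arr)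

-- ===== LEMMAS AND PROOFS =====

-- One foldr pass computing (kept elements, minimum of the list): the reference form both ports are reduced to.
def specMin : List Int → List Int × Option Int
  | [] => ([], none)
  | x :: r =>
    match specMin r with
    | (_, none) => ([x], some x)
    | (s, some m) => if x < m then (x :: s, some x) else (s, some m)

lemma specMin_none : ∀ l : List Int, (specMin l).2 = none → l = [] := by
  intro l h
  cases l with
  | nil => rfl
  | cons x r =>
    exfalso
    rcases hr : specMin r with ⟨s, mo⟩
    cases mo <;> simp [specMin, hr] at h
    split at h <;> simp at h

lemma specMin_min : ∀ (l : List Int) (m : Int), (specMin l).2 = some m →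
    m ∈ l ∧ ∀ x ∈ l, m ≤ x := by
  intro l
  induction l with
  | nil => intro m h; simp [specMin] at h
  | cons x r ih =>
    intro m h
    rcases hr : specMin r with ⟨s, mo⟩
    cases mo with
    | none =>
      have hrnil : r = [] := specMin_none r (by rw [hr])
      subst hrnil
      simp [specMin] at h
      subst h; simp
    | some mr =>
      have hmem := ih mr (by rw [hr])
      simp [specMin, hr] at h
      split at h
      · rename_i hx
        cases h
        refine ⟨List.mem_cons_self, ?_⟩
        intro y hy
        rcases List.mem_cons.mp hy with hy | hy
        · omega
        · have := hmem.2 y hy; omega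
      · rename_i hx
        cases h
        refine ⟨List.mem_cons_of_mem _ hmem.1, ?_⟩
        intro y hy
        rcases List.mem_cons.mp hy with hy | hy
        · omega
        · exact hmem.2 y hy

-- x survives iff strictly below the minimum of the rest, iff strictly below everything in the rest
lemma specMin_cons (x : Int) (r : List Int) :
    (specMin (x :: r)).1 =
      (if r.all (fun y => decide (x < y)) then [x] else []) ++ (specMin r).1 := by
  rcases hr : specMin r with ⟨s, mo⟩
  cases mo with
  | none =>
    have hrnil : r = [] := specMin_none r (by rw [hr])
    subst hrnil
    have : s = [] := by simpa [specMin] using congrArg Prod.fst hr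
    subst this
    simp [specMin]
  | some mr =>
    have hmin := specMin_min r mr (by rw [hr])
    by_cases hx : x < mr
    · have hall : r.all (fun y => decide (x < y)) = true := by
        simp only [List.all_eq_true, decide_eq_true_eq]
        intro y hy
        have := hmin.2 y hy
        omega
      simp [specMin, hr, hx, hall]
    · have hall : r.all (fun y => decide (x < y)) = false := by
        simp only [List.all_eq_false]
        exact ⟨mr, hmin.1, by simpa using hx⟩
      simp [specMin, hr, hx, hall]

-- ===== A side =====

-- A stack element below the survivors is kept iff it is below every remaining input element;
-- with the stack strictly decreasing (head greatest) the loop detaches into the fresh run on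
-- the remaining input followed by the surviving old stack elements.
lemma solutionRun_decomp :
    ∀ (n : Nat) (rem stk : List Int), 2 * rem.length + stk.length ≤ n →
    stk.Pairwise (fun a b => b < a) →
    solutionRun rem stk =
      solutionRun rem [] ++ stk.filter (fun t => rem.all (fun x => decide (t < x))) := by
  intro n
  induction n with
  | zero =>
    intro rem stk hlen _
    have hr : rem = [] := by cases rem <;> simp_all
    have hs : stk = [] := by cases stk <;> simp_all
    subst hr; subst hs; simp [solutionRun.eq_1]
  | succ n ih =>
    intro rem stk hlen hpw
    cases rem with
    | nil =>
      simp only [solutionRun.eq_1, List.all_nil, List.filter_true, List.nil_append]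
    | cons x rest =>
      cases stk with
      | nil => simp
      | cons t s =>
        have hts : ∀ t' ∈ s, t' < t := (List.pairwise_cons.mp hpw).1
        by_cases hlt : t < x
        · -- push branch
          have hpw' : (x :: t :: s).Pairwise (fun a b => b < a) := by
            refine List.pairwise_cons.mpr ⟨?_, hpw⟩
            intro b hb
            rcases List.mem_cons.mp hb with hb | hb
            · omega
            · have := hts b hb; omega
          have h1 := ih rest (x :: t :: s)
            (by simp only [List.length_cons] at hlen ⊢; omega) hpw'
          have h2 := ih rest [x] (by simp only [List.length_cons, List.length_nil] at hlen ⊢; omega) (by simp)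
          rw [solutionRun.eq_3, if_pos hlt, h1]
          conv_rhs => rw [solutionRun.eq_2, h2]
          rw [List.filter_cons]
          have hcong : (t :: s).filter (fun t' => rest.all (fun y => decide (t' < y)))
              = (t :: s).filter (fun t' => (x :: rest).all (fun y => decide (t' < y))) := by
            apply List.filter_congr
            intro t' ht'
            have ht'x : t' < x := by
              rcases List.mem_cons.mp ht' with ht' | ht'
              · omega
              · have := hts t' ht'; omega
            simp [ht'x]
          rw [hcong]
          simp only [List.filter_cons]
          split <;> simp
        · -- pop branch
          have h1 := ih (x :: rest) s (by simp only [List.length_cons] at hlen ⊢; omega)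
            (List.pairwise_cons.mp hpw).2
          rw [solutionRun.eq_3, if_neg hlt, h1]
          rw [List.filter_cons]
          have hfail : ((x :: rest).all (fun y => decide (t < y))) = false := by
            simp only [List.all_cons, Bool.and_eq_false_iff]
            left
            simpa using hlt
          rw [hfail]
          simp

lemma solutionRun_eq_specMin : ∀ arr : List Int,
    solutionRun arr [] = ((specMin arr).1).reverse := by
  intro arr
  induction arr with
  | nil => simp [solutionRun.eq_1, specMin]
  | cons x rest ih =>
    rw [solutionRun.eq_2,
      solutionRun_decomp (2 * rest.length + 1) rest [x] (le_refl _) (by simp),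
      ih, specMin_cons]
    cases h : rest.all (fun y => decide (x < y)) <;> simp [h]

-- ===== B side =====

-- the fold's result list is the seed followed by what the fold from an empty seed produces
lemma foldB_res : ∀ (l : List Int) (res0 : List Int) (m : Int),
    l.foldl (fun (st : List Int × Int) x => if x < st.2 then (st.1 ++ [x], x) else st) (res0, m)
    = (res0 ++ (l.foldl (fun (st : List Int × Int) x => if x < st.2 then (st.1 ++ [x], x) else st) ([], m)).1,
       (l.foldl (fun (st : List Int × Int) x => if x < st.2 then (st.1 ++ [x], x) else st) ([], m)).2) := by
  intro l
  induction l with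
  | nil => intro res0 m; simp
  | cons x l' ih =>
    intro res0 m
    simp only [List.foldl_cons]
    by_cases hx : x < m
    · simp only [if_pos hx, List.nil_append]
      rw [ih (res0 ++ [x]) x, ih [x] x]
      simp
    · simp only [if_neg hx]
      exact ih res0 m

lemma foldB_specMin : ∀ (l b rb : List Int) (mb : Int),
    specMin b = (rb, some mb) →
    specMin (l.reverse ++ b) =
      ((l.foldl (fun (st : List Int × Int) x => if x < st.2 then (st.1 ++ [x], x) else st) ([], mb)).1.reverse ++ rb,
       some ((l.foldl (fun (st : List Int × Int) x => if x < st.2 then (st.1 ++ [x], x) else st) ([], mb)).2)) := by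
  intro l
  induction l with
  | nil => intro b rb mb hb; simpa using hb
  | cons x l' ih =>
    intro b rb mb hb
    by_cases hx : x < mb
    · have hb' : specMin (x :: b) = (x :: rb, some x) := by
        rw [show specMin (x :: b) = (match specMin b with
          | (_, none) => ([x], some x)
          | (s, some m) => if x < m then (x :: s, some x) else (s, some m)) from rfl, hb]
        simp [hx]
      have hrec := ih (x :: b) (x :: rb) x hb'
      rw [List.reverse_cons, List.append_assoc,
        show ([x] ++ b) = (x :: b) from rfl, hrec]
      simp only [List.foldl_cons, if_pos hx, List.nil_append]
      rw [foldB_res l' [x] x]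
      simp
    · have hb' : specMin (x :: b) = (rb, some mb) := by
        rw [show specMin (x :: b) = (match specMin b with
          | (_, none) => ([x], some x)
          | (s, some m) => if x < m then (x :: s, some x) else (s, some m)) from rfl, hb]
        simp [hx]
      have hrec := ih (x :: b) rb mb hb'
      rw [List.reverse_cons, List.append_assoc,
        show ([x] ++ b) = (x :: b) from rfl, hrec]
      simp only [List.foldl_cons, if_neg hx]

lemma solution_alt_eq_specMin : ∀ arr : List Int,
    solution_alt arr = (specMin arr).1 := by
  intro arr
  unfold solution_alt
  rcases hrev : arr.reverse with _ | ⟨m0, l⟩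
  · have harr : arr = [] := by simpa using congrArg List.reverse hrev
    subst harr
    simp [specMin]
  · have harr : arr = l.reverse ++ [m0] := by
      have := congrArg List.reverse hrev
      simpa using this
    have hb : specMin [m0] = ([m0], some m0) := by simp [specMin]
    have hmain := foldB_specMin l [m0] [m0] m0 hb
    rw [← harr] at hmain
    show (l.foldl (fun (st : List Int × Int) x =>
        if x < st.2 then (st.1 ++ [x], x) else st) ([m0], m0)).1.reverse = (specMin arr).1
    rw [foldB_res l [m0] m0, hmain]
    simp

-- ===== VERDICT (by name: the statement is the Claim_ definition above) =====
theorem solution_spec : Claim_equal_solution := by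
  intro arr _
  unfold Spec_solution solution
  rw [solutionRun_eq_specMin, solution_alt_eq_specMin]
  simp
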